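-- pv_equiv track=rewrite | github.com/Hunterthief/WildAtlas | generator/modules/extractors/weight.py | _get_section_priority
-- ===== SOURCE A (Python) =====
-- from typing import Dict, Optional, List, Tuple
--
-- def _get_section_priority(sections: Dict[str, str]) -> List[Tuple[str, str]]:
--     """Get sections in priority order for weight extraction"""
--     # Based on actual Wikipedia structure - Size section has weight for elephants!
--     priority_order = [
--         "size",             # MOST IMPORTANT for elephants - has "weigh 2600-3500 kg"
--         "description",      # Often has weight summary
--         "summary",          # Often has key stats
--         "hunting_diet",     # Diet sections often mention prey/weight
--         "behavior",         # Can include size/weight info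
--         "habitat",          # Sometimes has size info
--         "reproduction",     # Can have weight info
--         "distribution",     # Less likely but possible
--         "etymology",        # Rare but possible
--         "threats",          # Rare but possible
--         "conservation",     # Least likely
--     ]
--
--     result = []
--     for section_name in priority_order:
--         if section_name in sections and sections[section_name]:
--             result.append((section_name, sections[section_name]))
--
--     return result
-- ===== SOURCE B (Python) =====
-- from typing import Dict, List, Tuple
--
-- def _get_section_priority(sections: Dict[str, str]) -> List[Tuple[str, str]]:
--     """Get sections in priority order for weight extraction"""
--     priority_order = [
--         "size", "description", "summary", "hunting_diet", "behavior",
--         "habitat", "reproduction", "distribution", "etymology", "threats",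
--         "conservation",
--     ]
--     index = {name: i for i, name in enumerate(priority_order)}
--     # One pass over the dict, bucketing each wanted truthy section into its
--     # fixed priority slot; the slots are already in priority order.
--     slots = [None] * len(priority_order)
--     for name, text in sections.items():
--         i = index.get(name)
--         if i is not None and text:
--             slots[i] = (name, text)
--     return [entry for entry in slots if entry is not None]
-- ===== Notes on version B (the rewrite author's own statement) =====
-- stated objective: alternative
-- what changed: Instead of scanning the fixed priority list and probing the dict for each name, B builds a name-to-priority index once and makes a single pass over the dict, bucketing each wanted truthy section into its fixed priority slot and reading the slots off in order.
import Mathlib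
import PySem

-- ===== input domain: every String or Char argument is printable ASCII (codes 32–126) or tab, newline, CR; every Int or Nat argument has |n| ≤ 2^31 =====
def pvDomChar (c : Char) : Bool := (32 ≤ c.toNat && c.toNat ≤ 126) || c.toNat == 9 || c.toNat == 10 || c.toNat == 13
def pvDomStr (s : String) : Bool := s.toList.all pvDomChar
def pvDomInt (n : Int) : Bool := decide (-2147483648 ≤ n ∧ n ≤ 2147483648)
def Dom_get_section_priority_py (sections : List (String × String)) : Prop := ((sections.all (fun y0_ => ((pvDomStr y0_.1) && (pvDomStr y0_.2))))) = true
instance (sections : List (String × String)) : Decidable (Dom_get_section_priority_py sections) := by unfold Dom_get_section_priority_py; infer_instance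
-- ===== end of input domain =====

-- B replaces A's scan of the fixed priority list (with a dict probe per name) by a single
-- pass over the dict that buckets each wanted truthy section into its fixed priority slot
-- (objective: alternative traversal, same result).

-- ===== PORT A =====
def prioNames : List String :=
  ["size", "description", "summary", "hunting_diet", "behavior",
   "habitat", "reproduction", "distribution", "etymology", "threats", "conservation"]

def get_section_priority_py (sections : List (String × String)) : List (String × String) :=
  prioNames.foldl (fun result name =>
    match (PySem.Dict.mk sections).get? name with   -- 'name in sections and sections[name]'
    | some v => if v ≠ "" then result ++ [(name, v)] else result
    | none => result) []

-- ===== PORT B =====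
-- index = {name: i for i, name in enumerate(priority_order)}  (indices 0..10, toNat exact)
def prioIdx : PySem.Dict String Nat :=
  PySem.Dict.ofList ((PySem.List.enumerate prioNames 0).map (fun p => (p.2, p.1.toNat)))

-- one loop-body step: 'i = index.get(name); if i is not None and text: slots[i] = (name, text)'
def pvStepB (slots : List (Option (String × String))) (kv : String × String) :
    List (Option (String × String)) :=
  match prioIdx.get? kv.1 with
  | some i => if kv.2 ≠ "" then slots.set i (some kv) else slots
  | none => slots

def get_section_priority_py_alt (sections : List (String × String)) : List (String × String) :=
  (sections.foldl pvStepB (List.replicate prioNames.length none)).filterMap id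

-- ===== PRECONDITION & SPEC =====
-- Pre_ excludes association lists with duplicate keys: the parameter is a Python dict, which
-- cannot contain a duplicate key, so such lists correspond to no actual input of either Python.
def Pre_get_section_priority_py (sections : List (String × String)) : Prop :=
  (sections.map Prod.fst).Nodup
instance (sections : List (String × String)) : Decidable (Pre_get_section_priority_py sections) := by unfold Pre_get_section_priority_py; infer_instance

def pvWitness_get_section_priority_py : (List (String × String)) :=
  [("size", "weigh 2600-3500 kg"), ("threats", "poaching"), ("habitat", "")]

def Spec_get_section_priority_py (sections : List (String × String)) (out : List (String × String)) : Prop := out = get_section_priority_py_alt sections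
instance (sections : List (String × String)) (out : List (String × String)) : Decidable (Spec_get_section_priority_py sections out) := by unfold Spec_get_section_priority_py; infer_instance

-- ===== CLAIM (what is proved, stated in full; the proofs are below) =====
def Claim_equal_get_section_priority_py : Prop := ∀ (sections : List (String × String)), Dom_get_section_priority_py sections → Pre_get_section_priority_py sections → Spec_get_section_priority_py sections (get_section_priority_py sections)

-- ===== LEMMAS AND PROOFS =====

-- prioIdx as a literal dict
theorem prioIdx_eq : prioIdx = PySem.Dict.mk
    [("size", 0), ("description", 1), ("summary", 2), ("hunting_diet", 3), ("behavior", 4),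
     ("habitat", 5), ("reproduction", 6), ("distribution", 7), ("etymology", 8),
     ("threats", 9), ("conservation", 10)] := by decide

theorem prio_at (j : Nat) (hj : j < 11) : prioIdx.get? (prioNames[j]!) = some j := by
  rw [prioIdx_eq]
  interval_cases j <;> decide

set_option maxHeartbeats 1000000 in
theorem prio_inv (k : String) (i : Nat) (h : prioIdx.get? k = some i) :
    i < 11 ∧ prioNames[i]! = k := by
  rw [prioIdx_eq] at h
  simp only [PySem.Dict.get?_mk_cons] at h
  rw [show (PySem.Dict.mk ([] : List (String × Nat))).get? k = none from rfl] at h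
  split_ifs at h <;>
    first
      | exact Option.noConfusion h
      | (rename_i hb
         injection h with h'
         subst h'
         exact ⟨by omega, by rw [← eq_of_beq hb]; decide⟩)

theorem foldl_step_length (sections : List (String × String))
    (slots : List (Option (String × String))) :
    (sections.foldl pvStepB slots).length = slots.length := by
  induction sections generalizing slots with
  | nil => rfl
  | cons kv rest ih =>
      rw [List.foldl_cons, ih]
      unfold pvStepB
      cases prioIdx.get? kv.1 with
      | none => rfl
      | some i => dsimp only; split <;> simp

theorem slots_final (sections : List (String × String))
    (hnd : (sections.map Prod.fst).Nodup)
    (slots : List (Option (String × String))) (hlen : slots.length = 11)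
    (j : Nat) (hj : j < 11) :
    (sections.foldl pvStepB slots)[j]! =
      (match (PySem.Dict.mk sections).get? (prioNames[j]!) with
       | some v => if v ≠ "" then some (prioNames[j]!, v) else slots[j]!
       | none => slots[j]!) := by
  induction sections generalizing slots with
  | nil => simp [PySem.Dict.get?]
  | cons kv rest ih =>
      obtain ⟨k, v⟩ := kv
      simp only [List.map_cons, List.nodup_cons] at hnd
      obtain ⟨hknot, hndr⟩ := hnd
      rw [List.foldl_cons]
      have hlen' : (pvStepB slots (k, v)).length = 11 := by
        unfold pvStepB; cases prioIdx.get? k with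
        | none => simpa
        | some i => dsimp only; split <;> simp [hlen]
      rw [ih hndr _ hlen']
      rw [PySem.Dict.get?_mk_cons]
      by_cases hk : k = prioNames[j]!
      · have hnone : (PySem.Dict.mk rest).get? (prioNames[j]!) = none := by
          rw [PySem.Dict.get?_eq_none_iff_not_mem_keys]
          rw [← hk]; simpa using hknot
        rw [hnone, hk]
        simp only [beq_self_eq_true, if_true]
        show (pvStepB slots (prioNames[j]!, v))[j]! = _
        unfold pvStepB
        rw [prio_at j hj]
        dsimp only
        by_cases hv : v = ""
        · simp [hv]
        · rw [if_pos hv]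
          rw [List.getElem!_eq_getElem?_getD, List.getElem?_set_self (by omega)]
          simp [hv]
      · rw [beq_eq_false_iff_ne.mpr hk]
        simp only [Bool.false_eq_true, if_false]
        have hsame : (pvStepB slots (k, v))[j]! = slots[j]! := by
          unfold pvStepB
          cases hidx : prioIdx.get? k with
          | none => rfl
          | some i =>
              obtain ⟨hi11, hname⟩ := prio_inv k i hidx
              have hij : i ≠ j := by
                intro h; exact hk (by rw [← hname, h])
              dsimp only; split
              · rw [List.getElem!_eq_getElem?_getD, List.getElem!_eq_getElem?_getD,
                    List.getElem?_set_ne hij]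
              · rfl
        rw [hsame]

theorem foldl_prio (names : List String) (f : String → Option String)
    (acc : List (String × String)) :
    names.foldl (fun res n =>
      match f n with
      | some v => if v ≠ "" then res ++ [(n, v)] else res
      | none => res) acc
    = acc ++ (names.map (fun n =>
        match f n with
        | some v => if v ≠ "" then some (n, v) else none
        | none => none)).filterMap id := by
  induction names generalizing acc with
  | nil => simp
  | cons n rest ih =>
      rw [List.foldl_cons, List.map_cons, List.filterMap_cons]
      cases f n with
      | none => simpa using ih acc
      | some v =>
          dsimp only
          by_cases hv : v = ""
          · subst hv
            rw [if_neg (by decide), if_neg (by decide)]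
            simpa using ih acc
          · rw [if_pos hv, if_pos hv, ih]; simp

theorem slots_eq_map (sections : List (String × String))
    (hnd : (sections.map Prod.fst).Nodup) :
    sections.foldl pvStepB (List.replicate prioNames.length none)
      = prioNames.map (fun n =>
          match (PySem.Dict.mk sections).get? n with
          | some v => if v ≠ "" then some (n, v) else none
          | none => none) := by
  apply List.ext_getElem
  · rw [foldl_step_length]; simp [prioNames]
  · intro i h1 h2
    have hi : i < 11 := by
      simpa [prioNames] using h2
    have hlen0 : (List.replicate prioNames.length (none : Option (String × String))).length = 11 := by
      simp [prioNames]
    have hfin := slots_final sections hnd _ hlen0 i hi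
    have hbang : (sections.foldl pvStepB (List.replicate prioNames.length none))[i]!
        = (sections.foldl pvStepB (List.replicate prioNames.length none))[i] := by
      rw [List.getElem!_eq_getElem?_getD, List.getElem?_eq_getElem h1]; rfl
    rw [← hbang, hfin]
    have hrep : (List.replicate prioNames.length (none : Option (String × String)))[i]! = none := by
      rw [List.getElem!_eq_getElem?_getD]
      interval_cases i <;> rfl
    have hname : prioNames[i]! = prioNames[i] := by
      rw [List.getElem!_eq_getElem?_getD, List.getElem?_eq_getElem (by simpa [prioNames] using hi)]
      rfl
    rw [hrep, List.getElem_map, hname]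
    cases (PySem.Dict.mk sections).get? (prioNames[i]) <;> rfl

-- ===== VERDICT (by name: the statement is the Claim_ definition above) =====
theorem get_section_priority_py_spec : Claim_equal_get_section_priority_py := by
  intro sections _hdom hpre
  unfold Spec_get_section_priority_py
  unfold get_section_priority_py get_section_priority_py_alt
  rw [foldl_prio prioNames (fun n => (PySem.Dict.mk sections).get? n) []]
  rw [slots_eq_map sections hpre]
  simp
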